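-- pv_equiv track=rewrite | github.com/c0debr34k3r/Codebreaker | PSelection/BlindMI.py | sortid_calweights
-- ===== SOURCE A (Python) =====
-- def sortid_calweights(index_list):
--     index_count = {}
--     for index in index_list:
--         if index in index_count:
--             index_count[index] += 1
--         else:
--             index_count[index] = 1
--     sorted_indices = sorted(index_count.keys())
--
--     weights = [index_count[index] for index in sorted_indices]
--
--     return sorted_indices, weights
-- ===== SOURCE B (Python) =====
-- def sortid_calweights(index_list):
--     s = sorted(index_list)
--     runs = []
--     i, n = 0, len(s)
--     while i < n:
--         j = i + 1
--         while j < n and s[j] == s[i]: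
--             j += 1
--         runs.append((s[i], j - i))
--         i = j
--     return [k for k, _ in runs], [c for _, c in runs]
-- ===== Notes on version B (the rewrite author's own statement) =====
-- stated objective: alternative
-- what changed: B drops the counting dictionary entirely: it sorts the list once and makes a single two-pointer pass grouping consecutive equal elements, reading off the distinct values and their run lengths.
import Mathlib
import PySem

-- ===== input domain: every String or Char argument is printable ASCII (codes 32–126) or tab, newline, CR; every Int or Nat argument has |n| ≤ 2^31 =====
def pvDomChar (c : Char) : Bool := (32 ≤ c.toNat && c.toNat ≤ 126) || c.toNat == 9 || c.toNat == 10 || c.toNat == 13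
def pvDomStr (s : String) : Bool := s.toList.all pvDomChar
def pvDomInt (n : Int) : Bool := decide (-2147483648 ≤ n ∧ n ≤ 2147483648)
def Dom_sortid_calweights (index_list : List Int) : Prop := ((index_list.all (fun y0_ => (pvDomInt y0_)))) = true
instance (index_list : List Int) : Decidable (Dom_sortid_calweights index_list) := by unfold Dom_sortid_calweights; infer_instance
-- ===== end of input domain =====

-- B replaces A's counting dictionary by sort-then-group-consecutive-runs (alternative decomposition, same result).


-- ===== PORT A =====
def sortid_calweights (index_list : List Int) : List Int × List Int :=
  let index_count := index_list.foldl
    (fun d index =>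
      if d.contains index then d.insert index (d.getD index 0 + 1)  -- index_count[index] += 1
      else d.insert index 1)                                        -- index_count[index] = 1
    PySem.Dict.empty
  let sorted_indices := PySem.List.sorted index_count.keys (fun x => x) false
  let weights := sorted_indices.map (fun index => index_count.getD index 0)
  (sorted_indices, weights)

-- ===== PORT B =====
-- the two-pointer scan of Source B: the inner 'while s[j] == s[i]' is the takeWhile over the tail,
-- 'i = j' is the dropWhile; each run contributes (value, run length)
def pvGroupRuns : List Int → List (Int × Int)
  | [] => []
  | x :: xs =>
      (x, 1 + ((xs.takeWhile (fun y => y == x)).length : Int)) ::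
        pvGroupRuns (xs.dropWhile (fun y => y == x))
termination_by t => t.length
decreasing_by
  simp only [List.length_cons]
  exact Nat.lt_succ_of_le (List.dropWhile_sublist _).length_le

def sortid_calweights_alt (index_list : List Int) : List Int × List Int :=
  let runs := pvGroupRuns (PySem.List.sorted index_list (fun x => x) false)
  (runs.map (·.1), runs.map (·.2))

-- ===== PRECONDITION & SPEC =====
def Spec_sortid_calweights (index_list : List Int) (out : List Int × List Int) : Prop := out = sortid_calweights_alt index_list
instance (index_list : List Int) (out : List Int × List Int) : Decidable (Spec_sortid_calweights index_list out) := by unfold Spec_sortid_calweights; infer_instance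

-- ===== CLAIM (what is proved, stated in full; the proofs are below) =====
def Claim_equal_sortid_calweights : Prop := ∀ (index_list : List Int), Dom_sortid_calweights index_list → Spec_sortid_calweights index_list (sortid_calweights index_list)

-- ===== LEMMAS AND PROOFS =====

-- on a ≤-sorted cons, everything the dropWhile keeps is strictly above the head
lemma pvRest_gt {x : Int} {xs : List Int} (h : (x :: xs).Pairwise (· ≤ ·)) :
    ∀ y ∈ xs.dropWhile (fun y => y == x), x < y := by
  intro y hy
  have hsub := List.dropWhile_sublist (l := xs) (fun y => y == x)
  have hle : ∀ z ∈ xs, x ≤ z := (List.pairwise_cons.mp h).1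
  have hpw : (xs.dropWhile (fun y => y == x)).Pairwise (· ≤ ·) :=
    ((List.pairwise_cons.mp h).2).sublist hsub
  cases hrest : xs.dropWhile (fun y => y == x) with
  | nil => simp [hrest] at hy
  | cons z zs =>
    have hz : x < z := by
      have := List.head?_dropWhile_not (fun y => y == x) xs
      rw [hrest] at this
      simp only [List.head?_cons] at this
      have hne : z ≠ x := by simpa using this
      have hzx : x ≤ z := hle z (hsub.mem (by simp [hrest]))
      omega
    rw [hrest] at hy
    rcases List.mem_cons.mp hy with rfl | hyz
    · exact hz
    · have := (List.pairwise_cons.mp (hrest ▸ hpw)).1 y hyz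
      omega

-- characterisation of pvGroupRuns on a ≤-sorted list
lemma pvGroupRuns_spec : ∀ t : List Int, t.Pairwise (· ≤ ·) →
    ((pvGroupRuns t).map (·.1)).Pairwise (· < ·) ∧
    (∀ k, k ∈ (pvGroupRuns t).map (·.1) ↔ k ∈ t) ∧
    (∀ p ∈ pvGroupRuns t, p.2 = (t.count p.1 : Int)) := by
  intro t
  induction t using pvGroupRuns.induct with
  | case1 => intro _; simp [pvGroupRuns]
  | case2 x xs ih =>
    intro h
    have hxxs : xs = xs.takeWhile (fun y => y == x) ++ xs.dropWhile (fun y => y == x) :=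
      (List.takeWhile_append_dropWhile).symm
    have hrun : ∀ y ∈ xs.takeWhile (fun y => y == x), y = x := by
      intro y hy; simpa using List.mem_takeWhile_imp hy
    have hrest := pvRest_gt h
    have hpwrest : (xs.dropWhile (fun y => y == x)).Pairwise (· ≤ ·) :=
      ((List.pairwise_cons.mp h).2).sublist (List.dropWhile_sublist _)
    obtain ⟨ih1, ih2, ih3⟩ := ih hpwrest
    have hcount_rest_x : (xs.dropWhile (fun y => y == x)).count x = 0 := by
      rw [List.count_eq_zero]
      intro hx; exact absurd (hrest x hx) (lt_irrefl x)
    have hcount_run : ∀ k, (xs.takeWhile (fun y => y == x)).count k =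
        if k = x then (xs.takeWhile (fun y => y == x)).length else 0 := by
      intro k
      split_ifs with hk
      · subst hk
        rw [List.count_eq_length.mpr]
        intro y hy; rw [hrun y hy]
      · rw [List.count_eq_zero]
        intro hy; exact hk ((hrun k hy).symm ▸ rfl)
    refine ⟨?_, ?_, ?_⟩
    · simp only [pvGroupRuns, List.map_cons]
      rw [List.pairwise_cons]
      refine ⟨?_, ih1⟩
      intro b hb
      rcases List.mem_map.mp hb with ⟨p, hp, rfl⟩
      have : p.1 ∈ (pvGroupRuns (xs.dropWhile (fun y => y == x))).map (·.1) :=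
        List.mem_map.mpr ⟨p, hp, rfl⟩
      exact hrest _ ((ih2 p.1).mp this)
    · intro k
      simp only [pvGroupRuns, List.map_cons, List.mem_cons, ih2]
      constructor
      · rintro (rfl | hk)
        · exact Or.inl rfl
        · exact Or.inr ((List.dropWhile_sublist _).mem hk)
      · intro hk
        rcases hk with rfl | hk
        · exact Or.inl rfl
        · conv at hk => rw [hxxs]
          rcases List.mem_append.mp hk with hk | hk
          · exact Or.inl (hrun k hk)
          · exact Or.inr hk
    · intro p hp
      simp only [pvGroupRuns, List.mem_cons] at hp
      rcases hp with rfl | hp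
      · simp only
        conv_rhs => rw [show x :: xs = [x] ++ xs by rfl, hxxs]
        rw [List.count_append, List.count_append, hcount_run, hcount_rest_x]
        simp
      · have h3 := ih3 p hp
        have hne : p.1 ≠ x := by
          have : p.1 ∈ xs.dropWhile (fun y => y == x) :=
            (ih2 p.1).mp (List.mem_map.mpr ⟨p, hp, rfl⟩)
          exact fun hEq => absurd (hEq ▸ hrest _ this) (lt_irrefl x)
        rw [h3]
        congr 1
        conv_rhs => rw [show x :: xs = [x] ++ xs by rfl, hxxs]
        rw [List.count_append, List.count_append, hcount_run, if_neg hne]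
        have hx1 : List.count p.1 [x] = 0 := by rw [List.count_eq_zero]; simp [hne]
        omega
-- A's fold is Counter(index_list)
lemma pvFold_eq_counter (l : List Int) :
    l.foldl (fun d index =>
      if d.contains index then d.insert index (d.getD index 0 + 1)
      else d.insert index 1) PySem.Dict.empty = PySem.Dict.counter l := by
  rw [PySem.List.foldl_congr_mem l _ (fun d x => d.insert x (d.getD x 0 + 1)) _ ?_]
  · exact PySem.Dict.foldl_insert_getD_add_one_eq_counter l
  · intro d x _
    by_cases hc : d.contains x
    · simp [hc]
    · simp [hc, PySem.Dict.getD_of_not_contains d (0 : Int) (by simpa using hc)]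

-- ===== VERDICT (by name: the statement is the Claim_ definition above) =====
theorem sortid_calweights_spec : Claim_equal_sortid_calweights := by
  intro l _
  unfold Spec_sortid_calweights sortid_calweights sortid_calweights_alt
  simp only [pvFold_eq_counter, PySem.Dict.keys_counter, PySem.Dict.getD_counter]
  set t := PySem.List.sorted l (fun x => x) false with ht
  obtain ⟨h1, h2, h3⟩ := pvGroupRuns_spec t (by simpa using PySem.List.sorted_pairwise l (fun x => x))
  have hkeys : PySem.List.sorted (PySem.Set.ofList l) (fun x => x) false =
      (pvGroupRuns t).map (·.1) := by
    apply PySem.List.sorted_eq_of_perm_of_pairwise_lt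
    · have hnd : ((pvGroupRuns t).map (·.1)).Nodup := h1.imp (fun hab => ne_of_lt hab)
      rw [List.perm_ext_iff_of_nodup hnd (PySem.Set.nodup_ofList l)]
      intro a
      rw [h2 a, PySem.Set.mem_ofList, ht, PySem.List.mem_sorted]
    · exact h1
  rw [hkeys]
  refine Prod.ext rfl ?_
  simp only [List.map_map]
  apply List.map_congr_left
  intro p hp
  have hcl : t.count p.1 = l.count p.1 := (PySem.List.sorted_perm l (fun x => x) false).count_eq p.1
  simp only [Function.comp]
  rw [h3 p hp, hcl]
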